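-- pv_equiv track=rewrite | github.com/Gromit-Kim/coding-test | Programmers/알고리즘 고득점 Kit/완전탐색/피로도 - backtracking.py | dfs
-- ===== SOURCE A (Python) =====
-- def dfs(cnt, n, visited, k, dungeons):
--     max_cnt = cnt # 현 깊이에서 최대 방문 횟수
--     for i , (required, cost) in enumerate(dungeons):
--         if not visited[i] and k >= required:
--             visited[i] = True
--             max_cnt = max(max_cnt, dfs(cnt+1, n+1, visited, k-cost, dungeons))
--             visited[i] = False
--     return max_cnt
-- ===== SOURCE B (Python) =====
-- def _perms(xs):
--     if not xs:
--         return [[]]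
--     out = []
--     for t in range(len(xs)):
--         for p in _perms(xs[:t] + xs[t + 1:]):
--             out.append([xs[t]] + p)
--     return out
--
--
-- def dfs(cnt, n, visited, k, dungeons):
--     avail = [i for i in range(len(dungeons)) if not visited[i]]
--     best = 0
--     for perm in _perms(avail):
--         fatigue, count = k, 0
--         for i in perm:
--             required, cost = dungeons[i]
--             if fatigue >= required:
--                 count += 1
--                 fatigue -= cost
--         best = max(best, count)
--     return cnt + best
-- ===== Notes on version B (the rewrite author's own statement) =====
-- stated objective: alternative
-- what changed: Replaced the recursive backtracking over a mutated visited list by a non-recursive exhaustive search: collect the available indices once, enumerate all orderings of them, and for each ordering run a single greedy skip-and-continue pass counting clearable dungeons; the answer is cnt plus the maximum count.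
import Mathlib
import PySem

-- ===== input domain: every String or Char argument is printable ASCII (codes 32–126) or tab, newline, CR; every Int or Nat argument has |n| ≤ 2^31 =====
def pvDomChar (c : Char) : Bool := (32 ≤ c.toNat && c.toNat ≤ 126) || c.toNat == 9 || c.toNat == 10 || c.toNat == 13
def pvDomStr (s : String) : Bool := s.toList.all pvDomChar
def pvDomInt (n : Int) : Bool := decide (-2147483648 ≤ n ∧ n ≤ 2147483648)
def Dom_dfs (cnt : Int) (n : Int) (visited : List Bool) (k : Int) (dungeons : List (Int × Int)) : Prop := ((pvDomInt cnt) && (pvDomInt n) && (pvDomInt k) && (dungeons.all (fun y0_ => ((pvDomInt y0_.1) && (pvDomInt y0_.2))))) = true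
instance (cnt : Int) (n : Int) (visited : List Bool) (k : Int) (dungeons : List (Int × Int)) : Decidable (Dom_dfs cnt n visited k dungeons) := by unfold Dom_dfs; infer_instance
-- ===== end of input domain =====

-- B replaces A's recursive backtracking over a mutated visited list by a flat enumeration of all
-- orderings of the available indices, each scored by one greedy skip-and-continue pass (alternative
-- decomposition, same exponential cost; A's backtracking restores visited, so no net mutation).

-- ===== PORT A =====
-- number of unvisited (False) flags: the termination measure of A's backtracking
def pvCountFalse (v : List Bool) : Nat := v.countP (fun b => b == false)

-- setting a flag that reads False to True strictly decreases the measure (used by decreasing_by)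
theorem pvCountFalse_set (v : List Bool) (i : Int) (h : PySem.List.pyGet? v i = some false) :
    pvCountFalse (PySem.List.pySetD v i true) < pvCountFalse v := by
  unfold PySem.List.pyGet? at h
  cases hk : PySem.List.pyIdx? v.length i with
  | none => rw [hk] at h; simp at h
  | some j =>
    rw [hk] at h; simp at h
    have hj : j < v.length := by
      by_contra hge
      rw [List.getElem?_eq_none (by omega)] at h; simp at h
    have hvj : v[j] = false := by
      rw [List.getElem?_eq_getElem hj] at h; simpa using h
    have hset : PySem.List.pySetD v i true = v.set j true := by
      unfold PySem.List.pySetD PySem.List.pySet?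
      rw [hk]; rfl
    rw [hset]
    unfold pvCountFalse
    rw [List.countP_set hj]
    simp [hvj]
    rw [← hvj]
    exact List.getElem_mem hj

mutual
  -- literal port of A: for i,(required,cost) in enumerate(dungeons): if not visited[i] and k>=required: …
  def dfs (cnt : Int) (n : Int) (visited : List Bool) (k : Int) (dungeons : List (Int × Int)) : Int :=
    dfsLoop cnt n visited k dungeons (PySem.List.enumerate dungeons) cnt
  termination_by (pvCountFalse visited, dungeons.length + 1)

  -- the for-loop of A, maxc = max_cnt so far
  def dfsLoop (cnt : Int) (n : Int) (visited : List Bool) (k : Int) (dungeons : List (Int × Int)) :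
      List (Int × Int × Int) → Int → Int
    | [], maxc => maxc
    | (i, required, cost) :: rest, maxc =>
      if h : PySem.List.pyGet? visited i = some false ∧ k ≥ required then
        dfsLoop cnt n visited k dungeons rest
          (max maxc (dfs (cnt + 1) (n + 1) (PySem.List.pySetD visited i true) (k - cost) dungeons))
      else
        dfsLoop cnt n visited k dungeons rest maxc
  termination_by rest _ => (pvCountFalse visited, rest.length)
  decreasing_by
  all_goals first
    | exact Prod.Lex.left _ _ (pvCountFalse_set visited i h.1)
    | exact Prod.Lex.right _ (by simp)
end

-- ===== PORT B =====
-- port of Source B's _perms: all orderings of xs (xs[:t]+xs[t+1:] is eraseIdx t)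
def pvPerms (xs : List Nat) : List (List Nat) :=
  if xs = [] then [[]]
  else
    (List.range xs.length).attach.foldl
      (fun out t => out ++ (pvPerms (xs.eraseIdx t.1)).map (fun p => xs.getD t.1 0 :: p)) []
termination_by xs.length
decreasing_by
  have := List.mem_range.mp t.2
  rw [List.length_eraseIdx_of_lt this]
  omega

-- the inner greedy pass of Source B: for i in perm: if fatigue >= required: count += 1; fatigue -= cost
def pvGreedyLoop (dungeons : List (Int × Int)) (fatigue count : Int) : List Nat → Int
  | [] => count
  | i :: rest =>
    let rc := dungeons.getD i (0, 0)
    if fatigue ≥ rc.1 then pvGreedyLoop dungeons (fatigue - rc.2) (count + 1) rest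
    else pvGreedyLoop dungeons fatigue count rest

-- avail = [i for i in range(len(dungeons)) if not visited[i]]
def pvAvail (visited : List Bool) (dungeons : List (Int × Int)) : List Nat :=
  (List.range dungeons.length).filter
    (fun i => decide (PySem.List.pyGet? visited (i : Int) = some false))

def dfs_alt (cnt : Int) (n : Int) (visited : List Bool) (k : Int) (dungeons : List (Int × Int)) : Int :=
  cnt + (pvPerms (pvAvail visited dungeons)).foldl
    (fun best perm => max best (pvGreedyLoop dungeons k 0 perm)) 0

-- ===== PRECONDITION & SPEC =====
-- Pre_ excludes only inputs where Python A raises IndexError: visited shorter than dungeons.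
def Pre_dfs (cnt : Int) (n : Int) (visited : List Bool) (k : Int) (dungeons : List (Int × Int)) : Prop :=
  dungeons.length ≤ visited.length
instance (cnt : Int) (n : Int) (visited : List Bool) (k : Int) (dungeons : List (Int × Int)) : Decidable (Pre_dfs cnt n visited k dungeons) := by unfold Pre_dfs; infer_instance

def pvWitness_dfs : Int × Int × List Bool × Int × (List (Int × Int)) :=
  (0, 3, [false, false, false], 80, [(80, 20), (50, 40), (30, 10)])

def Spec_dfs (cnt : Int) (n : Int) (visited : List Bool) (k : Int) (dungeons : List (Int × Int)) (out : Int) : Prop := out = dfs_alt cnt n visited k dungeons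
instance (cnt : Int) (n : Int) (visited : List Bool) (k : Int) (dungeons : List (Int × Int)) (out : Int) : Decidable (Spec_dfs cnt n visited k dungeons out) := by unfold Spec_dfs; infer_instance

-- ===== CLAIM (what is proved, stated in full; the proofs are below) =====
def Claim_equal_dfs : Prop := ∀ (cnt : Int) (n : Int) (visited : List Bool) (k : Int) (dungeons : List (Int × Int)), Dom_dfs cnt n visited k dungeons → Pre_dfs cnt n visited k dungeons → Spec_dfs cnt n visited k dungeons (dfs cnt n visited k dungeons)

-- ===== LEMMAS AND PROOFS =====

-- the common recursive value: max visits obtainable from fatigue k on the index set S (ordered-choice recursion)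
def pvM (k : Int) (d : List (Int × Int)) (S : List Nat) : Int :=
  (S.attach.map (fun t =>
      if k ≥ (d.getD t.1 (0, 0)).1 then 1 + pvM (k - (d.getD t.1 (0, 0)).2) d (S.erase t.1) else 0)).foldl max 0
termination_by S.length
decreasing_by
  rw [List.length_erase_of_mem t.2]
  have := List.length_pos_of_mem t.2
  omega

theorem pvM_eq_foldl (k : Int) (d : List (Int × Int)) (S : List Nat) :
    pvM k d S = S.foldl (fun acc j =>
      max acc (if k ≥ (d.getD j (0, 0)).1 then 1 + pvM (k - (d.getD j (0, 0)).2) d (S.erase j) else 0)) 0 := by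
  rw [pvM, List.foldl_map]
  exact List.foldl_attach (l := S) (b := (0:Int))
    (f := fun acc j => max acc (if k ≥ (d.getD j (0, 0)).1 then 1 + pvM (k - (d.getD j (0, 0)).2) d (S.erase j) else 0))

theorem pvM_nonneg (k : Int) (d : List (Int × Int)) (S : List Nat) : 0 ≤ pvM k d S := by
  rw [pvM_eq_foldl]
  exact (PySem.List.le_foldl_max_int S _ 0).1

theorem foldl_max_proj_le {α : Type} (l : List α) (f : α → Int) (a b : Int) (ha : a ≤ b)
    (h : ∀ x ∈ l, f x ≤ b) : l.foldl (fun acc x => max acc (f x)) a ≤ b := by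
  induction l generalizing a with
  | nil => exact ha
  | cons x t ih =>
    exact ih (max a (f x)) (max_le ha (h x List.mem_cons_self)) (fun y hy => h y (List.mem_cons_of_mem _ hy))

theorem pvM_le (k : Int) (d : List (Int × Int)) (S : List Nat) (b : Int) (hb : 0 ≤ b)
    (h : ∀ j ∈ S, (if k ≥ (d.getD j (0, 0)).1 then 1 + pvM (k - (d.getD j (0, 0)).2) d (S.erase j) else 0) ≤ b) :
    pvM k d S ≤ b := by
  rw [pvM_eq_foldl]
  exact foldl_max_proj_le S _ 0 b hb h

theorem pvM_mem_le (k : Int) (d : List (Int × Int)) (S : List Nat) (j : Nat) (hj : j ∈ S) :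
    (if k ≥ (d.getD j (0, 0)).1 then 1 + pvM (k - (d.getD j (0, 0)).2) d (S.erase j) else 0) ≤ pvM k d S := by
  conv_rhs => rw [pvM_eq_foldl]
  exact (PySem.List.le_foldl_max_int S _ 0).2 j hj

theorem pvM_erase_le (k : Int) (d : List (Int × Int)) (S : List Nat) (j : Nat)
    (hnd : S.Nodup) (hj : j ∈ S) : pvM k d (S.erase j) ≤ pvM k d S := by
  apply pvM_le _ _ _ _ (pvM_nonneg k d S)
  intro i hi
  have hij : i ≠ j := ((hnd.mem_erase_iff).mp hi).1
  have hiS : i ∈ S := ((hnd.mem_erase_iff).mp hi).2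
  have hji : j ∈ S.erase i := (hnd.mem_erase_iff).mpr ⟨hij.symm, hj⟩
  have hrec : pvM (k - (d.getD i (0, 0)).2) d ((S.erase j).erase i) ≤
      pvM (k - (d.getD i (0, 0)).2) d (S.erase i) := by
    rw [List.erase_comm]
    exact pvM_erase_le _ d (S.erase i) j (hnd.erase i) hji
  calc (if k ≥ (d.getD i (0, 0)).1 then 1 + pvM (k - (d.getD i (0, 0)).2) d ((S.erase j).erase i) else 0)
      ≤ (if k ≥ (d.getD i (0, 0)).1 then 1 + pvM (k - (d.getD i (0, 0)).2) d (S.erase i) else 0) := by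
        split_ifs with haf
        · omega
        · exact le_refl 0
    _ ≤ pvM k d S := pvM_mem_le k d S i hiS
termination_by S.length
decreasing_by
  rw [List.length_erase_of_mem hiS]
  have := List.length_pos_of_mem hiS
  omega

theorem pvGreedyLoop_shift (d : List (Int × Int)) (f c : Int) (p : List Nat) :
    pvGreedyLoop d f c p = c + pvGreedyLoop d f 0 p := by
  induction p generalizing f c with
  | nil => simp [pvGreedyLoop]
  | cons i rest ih =>
    simp only [pvGreedyLoop]
    split_ifs with h
    · rw [ih _ (c + 1), ih _ (0 + 1)]
      omega
    · exact ih f c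

-- unfolding of the greedy pass on a cons, accumulator normalised to 0
theorem pvGreedyLoop_cons (d : List (Int × Int)) (k : Int) (i : Nat) (p : List Nat) :
    pvGreedyLoop d k 0 (i :: p) =
      if k ≥ (d.getD i (0, 0)).1 then 1 + pvGreedyLoop d (k - (d.getD i (0, 0)).2) 0 p
      else pvGreedyLoop d k 0 p := by
  simp only [pvGreedyLoop]
  split_ifs with h
  · rw [pvGreedyLoop_shift]
    omega
  · rfl

theorem pvGreedyLoop_nonneg (d : List (Int × Int)) (f : Int) (p : List Nat) :
    0 ≤ pvGreedyLoop d f 0 p := by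
  induction p generalizing f with
  | nil => simp [pvGreedyLoop]
  | cons i rest ih =>
    rw [pvGreedyLoop_cons]
    split_ifs with h
    · have := ih (f - (d.getD i (0, 0)).2)
      omega
    · exact ih f

theorem pvGreedy_le_pvM (d : List (Int × Int)) (p S : List Nat) (k : Int)
    (hperm : p.Perm S) (hnd : S.Nodup) : pvGreedyLoop d k 0 p ≤ pvM k d S := by
  induction p generalizing S k with
  | nil => simpa [pvGreedyLoop] using pvM_nonneg k d S
  | cons j p' ih =>
    obtain ⟨hjS, hp'⟩ := List.cons_perm_iff_perm_erase.mp hperm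
    rw [pvGreedyLoop_cons]
    have hmem := pvM_mem_le k d S j hjS
    split_ifs with h
    · rw [if_pos h] at hmem
      have := ih (S.erase j) (k - (d.getD j (0, 0)).2) hp' (hnd.erase j)
      omega
    · exact le_trans (ih (S.erase j) k hp' (hnd.erase j)) (pvM_erase_le k d S j hnd hjS)

-- unfolding of pvPerms on a nonempty list as a flatMap
theorem pvPerms_eq (xs : List Nat) (h : xs ≠ []) :
    pvPerms xs = (List.range xs.length).attach.flatMap
      (fun t => (pvPerms (xs.eraseIdx t.1)).map (fun p => xs.getD t.1 0 :: p)) := by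
  rw [pvPerms, if_neg h, PySem.List.foldl_append_eq_flatMap]
  rfl

theorem pvPerms_perm (xs p : List Nat) (h : p ∈ pvPerms xs) : p.Perm xs := by
  by_cases hx : xs = []
  · subst hx
    rw [pvPerms] at h
    simp at h
    simp [h]
  · rw [pvPerms_eq xs hx] at h
    obtain ⟨t, _, hmem⟩ := List.mem_flatMap.mp h
    obtain ⟨q, hq, rfl⟩ := List.mem_map.mp hmem
    have htlt : t.1 < xs.length := List.mem_range.mp t.2
    have hq' : q.Perm (xs.eraseIdx t.1) := pvPerms_perm (xs.eraseIdx t.1) q hq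
    rw [List.getD_eq_getElem xs 0 htlt]
    exact (hq'.cons xs[t.1]).trans (List.getElem_cons_eraseIdx_perm htlt)
termination_by xs.length
decreasing_by
  rw [List.length_eraseIdx_of_lt htlt]
  omega

theorem pvPerms_mem (xs p : List Nat) (hnd : xs.Nodup) (h : p.Perm xs) : p ∈ pvPerms xs := by
  match p with
  | [] =>
    have : xs = [] := h.symm.eq_nil
    subst this
    rw [pvPerms]
    simp
  | a :: p' =>
    have hx : xs ≠ [] := by
      intro hh
      subst hh
      exact absurd h.length_eq (by simp)
    obtain ⟨ha, hp'⟩ := List.cons_perm_iff_perm_erase.mp h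
    have htlt : xs.idxOf a < xs.length := List.idxOf_lt_length_of_mem ha
    have herase : xs.erase a = xs.eraseIdx (xs.idxOf a) := List.erase_eq_eraseIdx_of_idxOf rfl
    rw [pvPerms_eq xs hx]
    apply List.mem_flatMap.mpr
    refine ⟨⟨xs.idxOf a, List.mem_range.mpr htlt⟩, List.mem_attach _ _, ?_⟩
    apply List.mem_map.mpr
    refine ⟨p', ?_, ?_⟩
    · rw [← herase]
      exact pvPerms_mem (xs.erase a) p' (hnd.erase a) hp'
    · rw [List.getD_eq_getElem xs 0 htlt, List.getElem_idxOf htlt]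
termination_by xs.length
decreasing_by
  rw [List.length_erase_of_mem ha]
  have := List.length_pos_of_mem ha
  omega

theorem pvExists_perm (d : List (Int × Int)) (S : List Nat) (k : Int) (hnd : S.Nodup) :
    ∃ p ∈ pvPerms S, pvM k d S ≤ pvGreedyLoop d k 0 p := by
  have hmap : pvM k d S = (S.map (fun j =>
      if k ≥ (d.getD j (0, 0)).1 then 1 + pvM (k - (d.getD j (0, 0)).2) d (S.erase j) else 0)).foldl max 0 := by
    rw [pvM_eq_foldl, List.foldl_map]
  rcases PySem.List.foldl_max_mem (S.map (fun j =>
      if k ≥ (d.getD j (0, 0)).1 then 1 + pvM (k - (d.getD j (0, 0)).2) d (S.erase j) else 0)) 0 with h0 | hm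
  · refine ⟨S, pvPerms_mem S S hnd (List.Perm.refl S), ?_⟩
    rw [hmap, h0]
    exact pvGreedyLoop_nonneg d k S
  · rw [← hmap] at hm
    obtain ⟨j, hjS, hw⟩ := List.mem_map.mp hm
    by_cases haf : k ≥ (d.getD j (0, 0)).1
    · rw [if_pos haf] at hw
      obtain ⟨p', hp'mem, hp'le⟩ :=
        pvExists_perm d (S.erase j) (k - (d.getD j (0, 0)).2) (hnd.erase j)
      refine ⟨j :: p', ?_, ?_⟩
      · exact pvPerms_mem S (j :: p') hnd
          (List.cons_perm_iff_perm_erase.mpr ⟨hjS, pvPerms_perm (S.erase j) p' hp'mem⟩)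
      · rw [pvGreedyLoop_cons, if_pos haf]
        omega
    · rw [if_neg haf] at hw
      refine ⟨S, pvPerms_mem S S hnd (List.Perm.refl S), ?_⟩
      rw [← hw]
      exact pvGreedyLoop_nonneg d k S
termination_by S.length
decreasing_by
  rw [List.length_erase_of_mem hjS]
  have := List.length_pos_of_mem hjS
  omega

theorem pvBest_eq_pvM (d : List (Int × Int)) (S : List Nat) (k : Int) (hnd : S.Nodup) :
    (pvPerms S).foldl (fun best perm => max best (pvGreedyLoop d k 0 perm)) 0 = pvM k d S := by
  apply le_antisymm
  · exact foldl_max_proj_le (pvPerms S) _ 0 _ (pvM_nonneg k d S)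
      (fun p hp => pvGreedy_le_pvM d p S k (pvPerms_perm S p hp) hnd)
  · obtain ⟨p, hp, hle⟩ := pvExists_perm d S k hnd
    exact le_trans hle ((PySem.List.le_foldl_max_int (pvPerms S) _ 0).2 p hp)

theorem pvAvail_nodup (visited : List Bool) (d : List (Int × Int)) : (pvAvail visited d).Nodup := by
  exact (List.nodup_range).filter _

theorem pvAvail_set (visited : List Bool) (d : List (Int × Int)) (i : Nat)
    (hi : i < d.length) (hv : PySem.List.pyGet? visited (i : Int) = some false) :
    pvAvail (PySem.List.pySetD visited (i : Int) true) d = (pvAvail visited d).erase i := by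
  have hvlen : i < visited.length := by
    rw [PySem.List.pyGet?_natCast] at hv
    by_contra hge
    rw [List.getElem?_eq_none (by omega)] at hv
    simp at hv
  rw [List.Nodup.erase_eq_filter (pvAvail_nodup visited d) i]
  unfold pvAvail
  rw [List.filter_filter, PySem.List.pySetD_natCast]
  apply List.filter_congr
  intro j hj
  by_cases hji : j = i
  · subst hji
    simp [hvlen]
  · simp [hji, Ne.symm hji]

-- the for-loop of A is the corresponding foldl
theorem dfsLoop_eq (cnt n : Int) (visited : List Bool) (k : Int) (d : List (Int × Int))
    (rest : List (Int × Int × Int)) (maxc : Int) :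
    dfsLoop cnt n visited k d rest maxc = rest.foldl (fun m x =>
      if PySem.List.pyGet? visited x.1 = some false ∧ k ≥ x.2.1 then
        max m (dfs (cnt + 1) (n + 1) (PySem.List.pySetD visited x.1 true) (k - x.2.2) d)
      else m) maxc := by
  induction rest generalizing maxc with
  | nil => rw [dfsLoop]; rfl
  | cons x rest ih =>
    obtain ⟨i, r, c⟩ := x
    rw [dfsLoop]
    split_ifs with h
    · rw [ih, List.foldl_cons, if_pos h]
    · rw [ih, List.foldl_cons, if_neg h]

theorem foldl_if_filter {α : Type} (l : List α) (P : α → Prop) [DecidablePred P]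
    (F : Int → α → Int) (a : Int) :
    l.foldl (fun m x => if P x then F m x else m) a
      = (l.filter (fun x => decide (P x))).foldl F a := by
  induction l generalizing a with
  | nil => rfl
  | cons x t ih =>
    by_cases h : P x
    · rw [List.foldl_cons, if_pos h, List.filter_cons_of_pos (by simpa using h), List.foldl_cons, ih]
    · rw [List.foldl_cons, if_neg h, List.filter_cons_of_neg (by simpa using h), ih]

theorem add_foldl_max {α : Type} (c : Int) (l : List α) (w : α → Int) (a : Int) :
    c + l.foldl (fun m x => max m (w x)) a = l.foldl (fun m x => max m (c + w x)) (c + a) := by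
  induction l generalizing a with
  | nil => rfl
  | cons x t ih =>
    rw [List.foldl_cons, List.foldl_cons, ih, max_add_add_left]

theorem foldl_max_if_filter {α : Type} (l : List α) (P : α → Prop) [DecidablePred P]
    (G : α → Int) (c : Int) :
    ∀ b, c ≤ b → l.foldl (fun m x => max m (if P x then G x else c)) b
      = (l.filter (fun x => decide (P x))).foldl (fun m x => max m (G x)) b := by
  induction l with
  | nil => intro b _; rfl
  | cons x t ih =>
    intro b hb
    by_cases h : P x
    · rw [List.foldl_cons, if_pos h, List.filter_cons_of_pos (by simpa using h), List.foldl_cons]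
      exact ih (max b (G x)) (le_trans hb (le_max_left _ _))
    · rw [List.foldl_cons, if_neg h, List.filter_cons_of_neg (by simpa using h), max_eq_left hb]
      exact ih b hb

theorem dfs_eq_pvM (d : List (Int × Int)) (visited : List Bool) (cnt n k : Int) :
    dfs cnt n visited k d = cnt + pvM k d (pvAvail visited d) := by
  rw [dfs, dfsLoop_eq, PySem.List.enumerate_eq_map_pyRange d (0, 0), List.foldl_map,
    PySem.List.pyRange_one, List.foldl_map]
  simp only [zero_add, PySem.List.pyGetD_natCast, PySem.List.len_eq, sub_zero, Int.toNat_natCast]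
  rw [foldl_if_filter (List.range d.length)
    (fun (j : Nat) => PySem.List.pyGet? visited (j : Int) = some false ∧ k ≥ (d.getD j (0, 0)).1)
    (fun (m : Int) (j : Nat) => max m (dfs (cnt + 1) (n + 1) (PySem.List.pySetD visited (j : Int) true)
      (k - (d.getD j (0, 0)).2) d)) cnt]
  have hsplit : (List.range d.length).filter
      (fun (j : Nat) => decide (PySem.List.pyGet? visited (j : Int) = some false ∧ k ≥ (d.getD j (0, 0)).1))
      = (pvAvail visited d).filter (fun (j : Nat) => decide (k ≥ (d.getD j (0, 0)).1)) := by
    unfold pvAvail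
    rw [List.filter_filter]
    apply List.filter_congr
    intro j _
    rw [Bool.decide_and, Bool.and_comm]
  rw [hsplit]
  have hcong := PySem.List.foldl_congr_mem
    ((pvAvail visited d).filter (fun (j : Nat) => decide (k ≥ (d.getD j (0, 0)).1)))
    (fun (m : Int) (j : Nat) => max m (dfs (cnt + 1) (n + 1) (PySem.List.pySetD visited (j : Int) true)
      (k - (d.getD j (0, 0)).2) d))
    (fun (m : Int) (j : Nat) => max m ((cnt + 1) + pvM (k - (d.getD j (0, 0)).2) d ((pvAvail visited d).erase j)))
    cnt ?hc
  case hc =>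
    intro m j hjf
    have hj : j ∈ pvAvail visited d := List.mem_of_mem_filter hjf
    have hjp := List.mem_filter.mp hj
    have hjd : j < d.length := List.mem_range.mp hjp.1
    have hvj : PySem.List.pyGet? visited (j : Int) = some false := of_decide_eq_true hjp.2
    beta_reduce
    rw [dfs_eq_pvM d (PySem.List.pySetD visited (j : Int) true) (cnt + 1) (n + 1)
      (k - (d.getD j (0, 0)).2), pvAvail_set visited d j hjd hvj]
  rw [hcong, pvM_eq_foldl, add_foldl_max cnt (pvAvail visited d) _ 0, add_zero]
  have hbody : (fun (m : Int) (j : Nat) => max m (cnt +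
      if k ≥ (d.getD j (0, 0)).1 then 1 + pvM (k - (d.getD j (0, 0)).2) d ((pvAvail visited d).erase j) else 0))
      = (fun (m : Int) (j : Nat) => max m
      (if k ≥ (d.getD j (0, 0)).1 then (cnt + 1) + pvM (k - (d.getD j (0, 0)).2) d ((pvAvail visited d).erase j) else cnt)) := by
    funext m j
    split_ifs with h
    · rw [← add_assoc]
    · rw [add_zero]
  rw [hbody, foldl_max_if_filter (pvAvail visited d)
    (fun (j : Nat) => k ≥ (d.getD j (0, 0)).1)
    (fun (j : Nat) => (cnt + 1) + pvM (k - (d.getD j (0, 0)).2) d ((pvAvail visited d).erase j))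
    cnt cnt (le_refl cnt)]
termination_by pvCountFalse visited
decreasing_by
  exact pvCountFalse_set visited (j : Int) hvj

-- ===== VERDICT (by name: the statement is the Claim_ definition above) =====
theorem dfs_spec : Claim_equal_dfs := by
  intro cnt n visited k dungeons _ _
  unfold Spec_dfs dfs_alt
  rw [dfs_eq_pvM, pvBest_eq_pvM dungeons _ k (pvAvail_nodup visited dungeons)]
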